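-- pv_equiv track=rewrite | github.com/gjabao/agentic-workflow-space | execution/scrape_skool_owners.py | _select_best_email
-- ===== SOURCE A (Python) =====
-- from typing import Dict, List, Optional, Any, Tuple
--
-- def _select_best_email(emails: List[str], owner_name: str) -> str:
--     """Select the best email from a list, prioritizing personal emails."""
--     if not emails:
--         return ''
--
--     # Personal email patterns (firstname, firstname.lastname, etc.)
--     personal_patterns = []
--     generic_patterns = []
--
--     owner_name_lower = owner_name.lower().replace(' ', '')
--     owner_parts = owner_name.lower().split()
--
--     for email in emails:
--         local_part = email.split('@')[0].lower()
--
--         # Check if email contains owner name parts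
--         if owner_parts and any(part in local_part for part in owner_parts):
--             personal_patterns.insert(0, email)  # Highest priority
--         elif '.' in local_part or '_' in local_part:
--             personal_patterns.append(email)
--         elif local_part in ['info', 'contact', 'hello', 'support', 'admin', 'team']:
--             generic_patterns.append(email)
--         else:
--             personal_patterns.append(email)
--
--     # Return best match
--     if personal_patterns:
--         return personal_patterns[0]
--     if generic_patterns:
--         return generic_patterns[0]
--     return emails[0]
-- ===== SOURCE B (Python) =====
-- def _select_best_email(emails, owner_name):
--     """Select the best email from a list, prioritizing personal emails."""
--     if not emails:
--         return ''
--
--     owner_parts = owner_name.lower().split()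
--
--     def local(e):
--         return e.split('@')[0].lower()
--
--     # Name-matched emails: the LAST one processed wins (A pushes them to the front).
--     matched = [e for e in emails if any(p in local(e) for p in owner_parts)]
--     if matched:
--         return matched[-1]
--
--     generic = {'info', 'contact', 'hello', 'support', 'admin', 'team'}
--     for e in emails:
--         l = local(e)
--         if '.' in l or '_' in l or l not in generic:
--             return e
--     return emails[0]
-- ===== Notes on version B (the rewrite author's own statement) =====
-- stated objective: simpler
-- what changed: Replaces A's single loop that maintains two accumulator lists (with insert(0) for name matches) by a filter taking the last name-matched email, else a first-match scan for non-generic local parts, else the first email.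
import Mathlib
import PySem

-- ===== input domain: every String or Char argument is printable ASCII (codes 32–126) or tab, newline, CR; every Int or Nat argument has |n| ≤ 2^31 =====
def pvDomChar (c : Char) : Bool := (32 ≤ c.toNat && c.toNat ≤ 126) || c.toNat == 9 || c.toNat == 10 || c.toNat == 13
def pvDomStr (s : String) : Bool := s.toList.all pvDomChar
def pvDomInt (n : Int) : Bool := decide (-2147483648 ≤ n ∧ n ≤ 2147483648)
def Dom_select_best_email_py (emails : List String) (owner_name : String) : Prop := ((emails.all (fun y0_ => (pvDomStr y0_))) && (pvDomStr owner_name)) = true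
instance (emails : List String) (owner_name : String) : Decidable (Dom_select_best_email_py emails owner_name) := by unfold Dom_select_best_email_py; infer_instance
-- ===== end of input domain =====

-- B replaces A's two-accumulator classification loop by a filter for name-matched
-- emails (last one wins) followed by a first-match scan for non-generic locals (objective: simpler).

-- shared helper: email.split('@')[0].lower()
-- (split? is none only for an empty separator, and split never yields an empty list,
--  so getD/headD never hit their defaults; exact)
def pvLocalLower (email : String) : String :=
  PySem.Str.lower (((PySem.Str.split? email "@").getD []).headD "")

def pvGeneric : List String := ["info", "contact", "hello", "support", "admin", "team"]

-- ===== PORT A =====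
def pvStepA (owner_parts : List String) (pg : List String × List String) (email : String) :
    List String × List String :=
  let local_part := pvLocalLower email
  if owner_parts ≠ [] ∧ owner_parts.any (fun part => PySem.Str.isIn part local_part) then
    (email :: pg.1, pg.2)                -- personal_patterns.insert(0, email)
  else if PySem.Str.isIn "." local_part || PySem.Str.isIn "_" local_part then
    (pg.1 ++ [email], pg.2)              -- personal_patterns.append(email)
  else if pvGeneric.contains local_part then
    (pg.1, pg.2 ++ [email])              -- generic_patterns.append(email)
  else
    (pg.1 ++ [email], pg.2)              -- personal_patterns.append(email)

-- (A's variable owner_name_lower is computed but never used; it is omitted.)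
def select_best_email_py (emails : List String) (owner_name : String) : String :=
  if emails = [] then ""
  else
    let owner_parts := PySem.Str.split₀ (PySem.Str.lower owner_name)
    let pg := emails.foldl (pvStepA owner_parts) ([], [])
    if pg.1 ≠ [] then pg.1.headD ""      -- personal_patterns[0] (list nonempty here)
    else if pg.2 ≠ [] then pg.2.headD ""
    else emails.headD ""                 -- emails[0] (emails nonempty here)

-- ===== PORT B =====
def pvIsNameMatch (parts : List String) (email : String) : Bool :=
  parts.any (fun p => PySem.Str.isIn p (pvLocalLower email))

def pvIsPersonalish (email : String) : Bool :=
  let l := pvLocalLower email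
  PySem.Str.isIn "." l || PySem.Str.isIn "_" l || !(pvGeneric.contains l)

def select_best_email_py_alt (emails : List String) (owner_name : String) : String :=
  if emails = [] then ""
  else
    let parts := PySem.Str.split₀ (PySem.Str.lower owner_name)
    match (emails.filter (pvIsNameMatch parts)).getLast? with
    | some e => e
    | none =>
      match emails.find? pvIsPersonalish with
      | some e => e
      | none => emails.headD ""

-- ===== PRECONDITION & SPEC =====
def Spec_select_best_email_py (emails : List String) (owner_name : String) (out : String) : Prop := out = select_best_email_py_alt emails owner_name
instance (emails : List String) (owner_name : String) (out : String) : Decidable (Spec_select_best_email_py emails owner_name out) := by unfold Spec_select_best_email_py; infer_instance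

-- ===== CLAIM (what is proved, stated in full; the proofs are below) =====
def Claim_equal_select_best_email_py : Prop := ∀ (emails : List String) (owner_name : String), Dom_select_best_email_py emails owner_name → Spec_select_best_email_py emails owner_name (select_best_email_py emails owner_name)

-- ===== LEMMAS AND PROOFS =====

lemma pv_step_match {parts : List String} {x : String} (hm : pvIsNameMatch parts x = true)
    (p g : List String) : pvStepA parts (p, g) x = (x :: p, g) := by
  have hne : parts ≠ [] := by rintro rfl; simp [pvIsNameMatch] at hm
  have hany : (parts.any fun part => PySem.Str.isIn part (pvLocalLower x)) = true := hm
  unfold pvStepA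
  rw [if_pos ⟨hne, hany⟩]

lemma pv_step_pers {parts : List String} {x : String} (hm : pvIsNameMatch parts x = false)
    (hp : pvIsPersonalish x = true) (p g : List String) :
    pvStepA parts (p, g) x = (p ++ [x], g) := by
  have hany : (parts.any fun part => PySem.Str.isIn part (pvLocalLower x)) = false := hm
  unfold pvStepA
  rw [if_neg (fun h => by rw [hany] at h; cases h.2)]
  cases hd : (PySem.Str.isIn "." (pvLocalLower x) || PySem.Str.isIn "_" (pvLocalLower x)) with
  | true => simp
  | false =>
    rw [Bool.or_eq_false_iff] at hd
    obtain ⟨hd1, hd2⟩ := hd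
    have hg : pvGeneric.contains (pvLocalLower x) = false := by
      simp only [pvIsPersonalish, hd1, hd2, Bool.false_or, Bool.not_eq_true'] at hp
      exact hp
    rw [if_neg (by simp), if_neg (by simpa using hg)]

lemma pv_step_gen {parts : List String} {x : String} (hm : pvIsNameMatch parts x = false)
    (hp : pvIsPersonalish x = false) (p g : List String) :
    pvStepA parts (p, g) x = (p, g ++ [x]) := by
  have hany : (parts.any fun part => PySem.Str.isIn part (pvLocalLower x)) = false := hm
  simp only [pvIsPersonalish, Bool.or_eq_false_iff, Bool.not_eq_false'] at hp
  obtain ⟨⟨hd1, hd2⟩, hg⟩ := hp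
  unfold pvStepA
  rw [if_neg (fun h => by rw [hany] at h; cases h.2)]
  rw [if_neg (by simp; exact ⟨hd1, hd2⟩), if_pos hg]

-- Invariant of A's loop: name-matched emails accumulate in reverse in front of the
-- initial personal list, "personalish" ones append behind it, the rest feed the generic list.
lemma pv_foldA_eq (parts : List String) (xs : List String) (p g : List String) :
    xs.foldl (pvStepA parts) (p, g) =
      ((xs.filter (pvIsNameMatch parts)).reverse ++ p
         ++ xs.filter (fun e => !pvIsNameMatch parts e && pvIsPersonalish e),
       g ++ xs.filter (fun e => !pvIsNameMatch parts e && !pvIsPersonalish e)) := by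
  induction xs generalizing p g with
  | nil => simp
  | cons x xs ih =>
    rw [List.foldl_cons]
    cases hm : pvIsNameMatch parts x with
    | true =>
      rw [pv_step_match hm, ih]
      simp [hm]
    | false =>
      cases hp : pvIsPersonalish x with
      | true =>
        rw [pv_step_pers hm hp, ih]
        simp [hm, hp]
      | false =>
        rw [pv_step_gen hm hp, ih]
        simp [hm, hp]

-- ===== VERDICT (by name: the statement is the Claim_ definition above) =====
theorem select_best_email_py_spec : Claim_equal_select_best_email_py := by
  intro emails owner_name _
  unfold Spec_select_best_email_py
  by_cases hnil : emails = []
  · simp [select_best_email_py, select_best_email_py_alt, hnil]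
  · simp only [select_best_email_py, select_best_email_py_alt, if_neg hnil, pv_foldA_eq]
    set parts := PySem.Str.split₀ (PySem.Str.lower owner_name) with hparts
    by_cases hMnil : emails.filter (pvIsNameMatch parts) = []
    · have hall : ∀ e ∈ emails, ¬ pvIsNameMatch parts e = true := by
        intro e he hme
        have : e ∈ emails.filter (pvIsNameMatch parts) := List.mem_filter.mpr ⟨he, hme⟩
        simp [hMnil] at this
      have hC1 : emails.filter (fun e => !pvIsNameMatch parts e && pvIsPersonalish e)
          = emails.filter pvIsPersonalish :=
        List.filter_congr (fun e he => by simp [hall e he])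
      have hfind : emails.find? pvIsPersonalish = (emails.filter pvIsPersonalish).head? :=
        List.head?_filter.symm
      by_cases hCnil : emails.filter pvIsPersonalish = []
      · have hC2 : emails.filter (fun e => !pvIsNameMatch parts e && !pvIsPersonalish e)
            = emails :=
          List.filter_eq_self.mpr (fun e he => by
            have h2 : pvIsPersonalish e = false := by
              cases h : pvIsPersonalish e with
              | false => rfl
              | true =>
                have : e ∈ emails.filter pvIsPersonalish := List.mem_filter.mpr ⟨he, h⟩
                simp [hCnil] at this
            simp [hall e he, h2])
        rw [hMnil, hC1, hC2, hCnil, hfind, hCnil]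
        simp [hnil]
      · obtain ⟨x, xs', hx⟩ := List.exists_cons_of_ne_nil hCnil
        rw [hMnil, hC1, hfind, hx]
        simp
    · have hrev : (emails.filter (pvIsNameMatch parts)).reverse ≠ [] := by simpa using hMnil
      obtain ⟨x, xs', hx⟩ := List.exists_cons_of_ne_nil hrev
      rw [List.getLast?_eq_head?_reverse, hx]
      simp
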